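-- pv_equiv track=rewrite | github.com/lbwry782-star/ACE-backend | engine/ad_promise_memory.py | _distinct_sources_from_history
-- ===== SOURCE A (Python) =====
-- from typing import Any, Dict, List, Optional, Tuple
--
-- def _distinct_sources_from_history(hist: List[Dict[str, Any]]) -> List[str]:
--     """Derive media sources present in stored history (legacy rows without source_type count as video)."""
--     found: set[str] = set()
--     for row in hist:
--         if not isinstance(row, dict):
--             continue
--         st_raw = (row.get("source_type") or "").strip().lower()
--         if st_raw == "image":
--             found.add("image")
--         else:
--             found.add("video")
--     return sorted(found)
-- ===== SOURCE B (Python) =====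
-- def _distinct_sources_from_history(hist):
--     """Derive media sources present in stored history (legacy rows without source_type count as video)."""
--     def is_image(row):
--         return isinstance(row, dict) and (row.get("source_type") or "").strip().lower() == "image"
--     def is_video(row):
--         return isinstance(row, dict) and (row.get("source_type") or "").strip().lower() != "image"
--     out = []
--     if any(is_image(row) for row in hist):
--         out.append("image")
--     if any(is_video(row) for row in hist):
--         out.append("video")
--     return out
-- ===== Notes on version B (the rewrite author's own statement) =====
-- stated objective: simpler
-- what changed: Replaces the set-accumulate-then-sort loop by two boolean any() scans ('is any row an image?', 'is any row a video?') and builds the already-sorted two-letter result directly.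
import Mathlib
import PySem

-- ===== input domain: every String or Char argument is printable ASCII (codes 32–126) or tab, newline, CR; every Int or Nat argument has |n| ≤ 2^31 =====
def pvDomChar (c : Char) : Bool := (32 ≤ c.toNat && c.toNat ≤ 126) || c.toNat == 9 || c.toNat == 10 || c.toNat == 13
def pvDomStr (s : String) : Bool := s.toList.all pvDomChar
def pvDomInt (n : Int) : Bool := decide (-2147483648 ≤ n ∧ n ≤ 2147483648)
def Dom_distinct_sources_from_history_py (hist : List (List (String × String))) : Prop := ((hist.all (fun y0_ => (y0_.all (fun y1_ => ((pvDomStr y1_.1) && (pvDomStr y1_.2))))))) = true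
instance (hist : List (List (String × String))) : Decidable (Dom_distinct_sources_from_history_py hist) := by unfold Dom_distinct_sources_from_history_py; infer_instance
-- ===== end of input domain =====

-- B replaces A's set-accumulate-then-sort loop by two boolean any-scans and builds the
-- already-sorted result directly (objective: simpler).

-- ===== PORT A =====
-- literal port: accumulate a set over the rows (isinstance(row, dict) is always true
-- under the type convention, so the 'continue' branch never fires), then sorted(found)
def distinct_sources_from_history_py (hist : List (List (String × String))) : List String :=
  let found : PySem.Set String :=
    hist.foldl
      (fun (found : PySem.Set String) row =>
        let st_raw := PySem.Str.lower (PySem.Str.strip ((PySem.Dict.get? (PySem.Dict.mk row) "source_type").getD ""))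
        if st_raw = "image" then PySem.Set.add found "image"
        else PySem.Set.add found "video")
      PySem.Set.empty
  PySem.List.sorted found (fun x => x) false

-- ===== PORT B =====
def pvIsImage (row : List (String × String)) : Bool :=
  PySem.Str.lower (PySem.Str.strip ((PySem.Dict.get? (PySem.Dict.mk row) "source_type").getD "")) == "image"

def distinct_sources_from_history_py_alt (hist : List (List (String × String))) : List String :=
  (if hist.any (fun row => pvIsImage row) then ["image"] else []) ++
  (if hist.any (fun row => !pvIsImage row) then ["video"] else [])

-- ===== PRECONDITION & SPEC =====
def Spec_distinct_sources_from_history_py (hist : List (List (String × String))) (out : List String) : Prop := out = distinct_sources_from_history_py_alt hist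
instance (hist : List (List (String × String))) (out : List String) : Decidable (Spec_distinct_sources_from_history_py hist out) := by unfold Spec_distinct_sources_from_history_py; infer_instance

-- ===== CLAIM (what is proved, stated in full; the proofs are below) =====
def Claim_equal_distinct_sources_from_history_py : Prop := ∀ (hist : List (List (String × String))), Dom_distinct_sources_from_history_py hist → Spec_distinct_sources_from_history_py hist (distinct_sources_from_history_py hist)

-- ===== LEMMAS AND PROOFS =====

-- per-row classification as A computes it
def pvClassify (row : List (String × String)) : String :=
  if pvIsImage row then "image" else "video"

-- A's fold is set(map(classify, hist))
theorem pvFoldl_eq_ofList (hist : List (List (String × String))) :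
    (hist.foldl
      (fun (found : PySem.Set String) row =>
        let st_raw := PySem.Str.lower (PySem.Str.strip ((PySem.Dict.get? (PySem.Dict.mk row) "source_type").getD ""))
        if st_raw = "image" then PySem.Set.add found "image"
        else PySem.Set.add found "video")
      PySem.Set.empty)
    = PySem.Set.ofList (hist.map pvClassify) := by
  rw [PySem.Set.ofList_eq_foldl, List.foldl_map]
  apply PySem.List.foldl_congr_mem
  intro s row _
  simp only [pvClassify, pvIsImage, beq_iff_eq]
  split_ifs <;> rfl

-- sorted(set(L)) for L over the alphabet {"image","video"}
theorem pvSorted_ofList (L : List String) (h : ∀ a ∈ L, a = "image" ∨ a = "video") :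
    PySem.List.sorted (PySem.Set.ofList L) (fun x => x) false
      = (if "image" ∈ L then ["image"] else []) ++ (if "video" ∈ L then ["video"] else []) := by
  have himv : ("image" : String) < "video" := by
    rw [String.lt_iff_toList_lt]; decide
  apply PySem.List.sorted_eq_of_perm_of_pairwise_lt
  · rw [List.perm_ext_iff_of_nodup ?nd (PySem.Set.nodup_ofList L)]
    · intro a
      simp only [PySem.Set.mem_ofList, List.mem_append]
      constructor
      · intro ha
        rcases ha with ha | ha <;> (split_ifs at ha with hm <;> simp_all)
      · intro ha
        rcases h a ha with rfl | rfl
        · left; simp [ha]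
        · right; simp [ha]
    case nd => split_ifs <;> simp [himv.ne]
  · split_ifs <;> simp [String.lt_iff_toList_lt] <;> decide

theorem pvMem_image_iff (hist : List (List (String × String))) :
    ("image" ∈ hist.map pvClassify) ↔ hist.any (fun row => pvIsImage row) = true := by
  simp only [List.mem_map, List.any_eq_true, pvClassify]
  constructor
  · rintro ⟨r, hr, h⟩
    refine ⟨r, hr, ?_⟩
    by_contra hb
    simp [hb] at h
  · rintro ⟨r, hr, h⟩
    exact ⟨r, hr, by simp [h]⟩

theorem pvMem_video_iff (hist : List (List (String × String))) :
    ("video" ∈ hist.map pvClassify) ↔ hist.any (fun row => !pvIsImage row) = true := by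
  simp only [List.mem_map, List.any_eq_true, pvClassify]
  constructor
  · rintro ⟨r, hr, h⟩
    refine ⟨r, hr, ?_⟩
    by_cases hb : pvIsImage r <;> simp [hb] at h ⊢
  · rintro ⟨r, hr, h⟩
    simp at h
    exact ⟨r, hr, by simp [h]⟩

-- ===== VERDICT (by name: the statement is the Claim_ definition above) =====
theorem distinct_sources_from_history_py_spec : Claim_equal_distinct_sources_from_history_py := by
  intro hist _
  unfold Spec_distinct_sources_from_history_py distinct_sources_from_history_py distinct_sources_from_history_py_alt
  rw [pvFoldl_eq_ofList, pvSorted_ofList]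
  · simp only [pvMem_image_iff, pvMem_video_iff]
  · intro a ha
    simp only [List.mem_map] at ha
    obtain ⟨r, _, rfl⟩ := ha
    unfold pvClassify
    split_ifs <;> simp
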